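-- pv_equiv track=rewrite | github.com/JungChangwoo/Algorithm_PS | GDSC/Kyul_GDSC.py | solution
-- ===== SOURCE A (Python) =====
-- from bisect import bisect_left, bisect_right
--
-- def down_bisect(array, start, end, target):
--     if start > end:
--         return start
--     mid = (start + end) // 2
--     if array[mid] == target:
--         return mid
--     elif array[mid] > target:
--         return down_bisect(array, mid+1, end, target)
--     else:
--         return down_bisect(array, start, mid-1, target)
--
-- def solution(kyul):
--     n = len(kyul)
--     up_d = [kyul[0]]
--     for i in range(1, n):
--         if kyul[i] >= up_d[-1]:
--             up_d.append(kyul[i])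
--         else:
--             idx = bisect_left(up_d, kyul[i])
--             up_d[idx] = kyul[i]
--
--     down_d = [kyul[0]]
--     for i in range(1, n):
--         if kyul[i] <= down_d[-1]:
--             down_d.append(kyul[i])
--         else:
--             idx = down_bisect(down_d, 0, len(down_d)-1, kyul[i])
--             down_d[idx] = kyul[i]
--     max_value = max(len(up_d), len(down_d))
--     result = n - max_value
--     return result
-- ===== SOURCE B (Python) =====
-- def solution(kyul):
--     def run(seq):
--         tails = []
--         for x in seq:
--             if not tails or x >= tails[-1]:
--                 tails = tails + [x]
--             else:
--                 i = sum(1 for t in tails if t < x)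
--                 tails = tails[:i] + [x] + tails[i+1:]
--         return len(tails)
--     best = max(run(kyul), run([-x for x in kyul]))
--     return len(kyul) - best
-- ===== Notes on version B (the rewrite author's own statement) =====
-- stated objective: simpler
-- what changed: B replaces A's two distinct patience passes (library bisect_left for the ascending tails plus a hand-written recursive binary search for the descending tails) by one generic pass applied to the list and to its element-wise negation, which finds the replacement slot by counting the strictly smaller tails instead of binary-searching.
import Mathlib
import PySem

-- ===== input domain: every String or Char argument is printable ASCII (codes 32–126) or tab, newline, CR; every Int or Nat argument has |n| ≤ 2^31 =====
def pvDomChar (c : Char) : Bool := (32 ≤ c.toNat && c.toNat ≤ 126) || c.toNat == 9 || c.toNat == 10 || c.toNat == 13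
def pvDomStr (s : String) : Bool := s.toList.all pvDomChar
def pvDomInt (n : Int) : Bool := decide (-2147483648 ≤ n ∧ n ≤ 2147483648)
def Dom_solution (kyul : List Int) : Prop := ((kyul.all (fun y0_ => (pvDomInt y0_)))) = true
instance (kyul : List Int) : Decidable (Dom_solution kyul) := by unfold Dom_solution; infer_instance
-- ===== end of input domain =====

-- B replaces A's two distinct patience passes (library bisect_left + a hand-written
-- recursive binary search) by ONE generic pass, applied to the list and to its
-- negation, that finds the replacement slot by counting the smaller tails.
-- Objective: simpler. Equality of results is proved for every non-empty list.

-- ===== PORT A =====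
-- A's helper down_bisect (recursive binary search on a descending list)
def downBisect (array : List Int) (start ende target : Int) : Int :=
  if h : start > ende then start
  else
    let mid := PySem.Int.floordiv (start + ende) 2
    if PySem.List.pyGetD array mid 0 = target then mid
    else if PySem.List.pyGetD array mid 0 > target then
      downBisect array (mid + 1) ende target
    else
      downBisect array start (mid - 1) target
termination_by (ende + 1 - start).toNat
decreasing_by
  all_goals
    have hb := PySem.Int.floordiv_two_mid_bounds (lo := start) (hi := ende) (by omega)
    omega

-- the body of A's up loop (bisect_left is PySem.List.bisectLeft)
def stepAUp (d : List Int) (x : Int) : List Int :=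
  if x ≥ PySem.List.pyGetD d (-1) 0 then d ++ [x]
  else PySem.List.pySetD d ((PySem.List.bisectLeft d x : Nat) : Int) x

-- the body of A's down loop
def stepADown (d : List Int) (x : Int) : List Int :=
  if x ≤ PySem.List.pyGetD d (-1) 0 then d ++ [x]
  else PySem.List.pySetD d (downBisect d 0 ((d.length : Int) - 1) x) x

def solution (kyul : List Int) : Int :=
  let n : Int := (kyul.length : Int)
  let up_d : List Int :=
    (PySem.List.pyRange 1 n 1).foldl
      (fun d i => stepAUp d (PySem.List.pyGetD kyul i 0))
      [PySem.List.pyGetD kyul 0 0]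
  let down_d : List Int :=
    (PySem.List.pyRange 1 n 1).foldl
      (fun d i => stepADown d (PySem.List.pyGetD kyul i 0))
      [PySem.List.pyGetD kyul 0 0]
  let max_value : Int := max (up_d.length : Int) (down_d.length : Int)
  n - max_value

-- ===== PORT B =====
-- one step of B's single generic pass: append if the tail allows it, otherwise
-- replace the slot found by counting strictly smaller tails
def stepB (tails : List Int) (x : Int) : List Int :=
  if tails = [] ∨ x ≥ PySem.List.pyGetD tails (-1) 0 then tails ++ [x]
  else
    let i := (tails.filter (fun t => decide (t < x))).length
    tails.take i ++ x :: tails.drop (i + 1)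

def runB (seq : List Int) : Int :=
  ((seq.foldl stepB []).length : Int)

def solution_alt (kyul : List Int) : Int :=
  let best := max (runB kyul) (runB (kyul.map (fun x => -x)))
  (kyul.length : Int) - best

-- ===== PRECONDITION & SPEC =====
-- A indexes the first element of kyul: it raises IndexError exactly on the empty list
def Pre_solution (kyul : List Int) : Prop := kyul ≠ []
instance (kyul : List Int) : Decidable (Pre_solution kyul) := by unfold Pre_solution; infer_instance
def pvWitness_solution : List Int := [3, 1, 2]

def Spec_solution (kyul : List Int) (out : Int) : Prop := out = solution_alt kyul
instance (kyul : List Int) (out : Int) : Decidable (Spec_solution kyul out) := by unfold Spec_solution; infer_instance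

-- ===== CLAIM (what is proved, stated in full; the proofs are below) =====
def Claim_equal_solution : Prop := ∀ (kyul : List Int), Dom_solution kyul → Pre_solution kyul → Spec_solution kyul (solution kyul)

-- ===== LEMMAS AND PROOFS =====

-- descending order: the elements strictly above x form a prefix; filter = take count
theorem filter_eq_take_desc (x : Int) (d : List Int)
    (hd : d.Pairwise (fun a b => b ≤ a)) :
    d.filter (fun t => decide (x < t)) = d.take (d.countP (fun t => decide (x < t))) := by
  induction d with
  | nil => rfl
  | cons a t ih =>
    rcases List.pairwise_cons.mp hd with ⟨ha, ht⟩
    by_cases hx : x < a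
    · simp [List.countP_cons, hx, ih ht]
    · have hnone : ∀ b ∈ t, ¬ (x < b) := fun b hb => by
        have := ha b hb; omega
      have h1 : (a :: t).filter (fun t => decide (x < t)) = [] := by
        rw [List.filter_eq_nil_iff]
        intro b hb
        rcases List.mem_cons.mp hb with h | h
        · simp [h, hx]
        · simp [hnone b h]
      have h2 : (a :: t).countP (fun t => decide (x < t)) = 0 := by
        rw [List.countP_eq_zero]
        intro b hb
        rcases List.mem_cons.mp hb with h | h
        · simp [h, hx]
        · simp [hnone b h]
      rw [h1, h2]; rfl

-- ascending order: the count of elements < x is bisectLeft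
theorem count_lt_eq_bisectLeft (x : Int) (d : List Int)
    (hd : d.Pairwise (fun a b => a ≤ b)) :
    (d.filter (fun t => decide (t < x))).length = PySem.List.bisectLeft d x := by
  obtain ⟨hble, h1, h2⟩ := PySem.List.bisectLeft_spec d x hd
  set b := PySem.List.bisectLeft d x with hb
  rw [← List.countP_eq_length_filter]
  have hsplit : d = d.take b ++ d.drop b := (List.take_append_drop b d).symm
  calc d.countP (fun t => decide (t < x))
      = (d.take b).countP (fun t => decide (t < x)) + (d.drop b).countP (fun t => decide (t < x)) := by
        conv_lhs => rw [hsplit]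
        rw [List.countP_append]
    _ = b := by
        have hA : (d.take b).countP (fun t => decide (t < x)) = (d.take b).length := by
          rw [List.countP_eq_length]
          intro a ha
          rw [List.mem_iff_getElem] at ha
          obtain ⟨j, hj, hja⟩ := ha
          have hjb : j < b := lt_of_lt_of_le hj (by simp)
          have hjd : j < d.length := lt_of_lt_of_le hjb hble
          have hto : (d.take b)[j] = d[j] := List.getElem_take
          simp only [← hja, hto]
          simpa using h1 j hjd hjb
        have hB : (d.drop b).countP (fun t => decide (t < x)) = 0 := by
          rw [List.countP_eq_zero]
          intro a ha
          rw [List.mem_iff_getElem] at ha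
          obtain ⟨j, hj, hja⟩ := ha
          have hjd : b + j < d.length := by
            have := List.length_drop (l := d) (i := b); omega
          have hto : (d.drop b)[j] = d[b + j] := by
            simpa using List.getElem_drop (l := d) (i := b) (j := j) (h := by omega)
          have hx := h2 (b + j) hjd (by omega)
          simp only [← hja, hto]
          simpa using not_lt.mpr hx
        rw [hA, hB, List.length_take]
        omega

-- on a sorted nonempty list, every element is ≤ the last one
theorem mem_le_getLast (d : List Int) (hd : d.Pairwise (fun a b => a ≤ b))
    (h : d ≠ []) : ∀ a ∈ d, a ≤ d.getLast h := by
  intro a ha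
  rw [List.mem_iff_getElem] at ha
  obtain ⟨j, hj, rfl⟩ := ha
  rw [List.getLast_eq_getElem]
  have hlen : 0 < d.length := List.length_pos_iff.mpr h
  by_cases hje : j = d.length - 1
  · subst hje; exact le_refl _
  · exact List.pairwise_iff_getElem.mp hd j (d.length - 1) hj (by omega) (by omega)

-- ===== the up pass: stepAUp = stepB on a sorted nonempty list =====
theorem stepAUp_eq_stepB (d : List Int) (x : Int)
    (hd : d.Pairwise (fun a b => a ≤ b)) (hne : d ≠ []) :
    stepAUp d x = stepB d x := by
  by_cases h : x ≥ PySem.List.pyGetD d (-1) 0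
  · rw [stepAUp, if_pos h, stepB, if_pos (Or.inr h)]
  · have hcond : ¬ (d = [] ∨ x ≥ PySem.List.pyGetD d (-1) 0) := by
      intro hc; rcases hc with hc | hc
      · exact hne hc
      · exact h hc
    rw [stepAUp, if_neg h, stepB, if_neg hcond]
    simp only
    rw [count_lt_eq_bisectLeft x d hd, PySem.List.pySetD_natCast]
    have hlast : x < d.getLast hne := by
      rw [PySem.List.pyGetD_neg_one d 0 hne] at h
      omega
    obtain ⟨hble, h1, h2⟩ := PySem.List.bisectLeft_spec d x hd
    have hlen : 0 < d.length := List.length_pos_iff.mpr hne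
    have hblen : PySem.List.bisectLeft d x < d.length := by
      by_contra hge
      have hbe : PySem.List.bisectLeft d x = d.length := by omega
      have := h1 (d.length - 1) (by omega) (by omega)
      rw [List.getLast_eq_getElem] at hlast
      omega
    exact List.set_eq_take_cons_drop x hblen

theorem stepB_sorted (d : List Int) (x : Int)
    (hd : d.Pairwise (fun a b => a ≤ b)) :
    (stepB d x).Pairwise (fun a b => a ≤ b) := by
  by_cases hc : d = [] ∨ x ≥ PySem.List.pyGetD d (-1) 0
  · rw [stepB, if_pos hc]
    rw [List.pairwise_append]
    refine ⟨hd, List.pairwise_singleton _ _, ?_⟩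
    intro a ha b hb
    rcases List.mem_singleton.mp hb with rfl
    rcases hc with hc | hc
    · subst hc; cases ha
    · have hne : d ≠ [] := by intro h; subst h; cases ha
      have := mem_le_getLast d hd hne a ha
      rw [PySem.List.pyGetD_neg_one d 0 hne] at hc
      omega
  · push_neg at hc
    obtain ⟨hne, hlt⟩ := hc
    rw [stepB, if_neg (by push_neg; exact ⟨hne, hlt⟩)]
    simp only
    rw [count_lt_eq_bisectLeft x d hd]
    obtain ⟨hble, h1, h2⟩ := PySem.List.bisectLeft_spec d x hd
    set b := PySem.List.bisectLeft d x with hb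
    have htake : ∀ a ∈ d.take b, a < x := by
      intro a ha
      rw [List.mem_iff_getElem] at ha
      obtain ⟨j, hj, hja⟩ := ha
      have hjb : j < b := lt_of_lt_of_le hj (by simp)
      have hjd : j < d.length := lt_of_lt_of_le hjb hble
      have hto : (d.take b)[j] = d[j] := List.getElem_take
      rw [← hja, hto]
      exact h1 j hjd hjb
    have hdrop : ∀ a ∈ d.drop (b+1), x ≤ a := by
      intro a ha
      rw [List.mem_iff_getElem] at ha
      obtain ⟨j, hj, hja⟩ := ha
      have hjd : b + 1 + j < d.length := by
        have := List.length_drop (l := d) (i := b + 1); omega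
      have hto : (d.drop (b+1))[j] = d[b + 1 + j] := by
        simpa using List.getElem_drop (l := d) (i := b + 1) (j := j) (h := by omega)
      rw [← hja, hto]
      exact h2 (b + 1 + j) hjd (by omega)
    rw [List.pairwise_append]
    refine ⟨hd.sublist (List.take_sublist _ _), ?_, ?_⟩
    · rw [List.pairwise_cons]
      exact ⟨hdrop, hd.sublist (List.drop_sublist _ _)⟩
    · intro a ha c hc
      rcases List.mem_cons.mp hc with rfl | hc
      · exact le_of_lt (htake a ha)
      · exact le_trans (le_of_lt (htake a ha)) (hdrop c hc)

theorem stepB_ne_nil (d : List Int) (x : Int) : stepB d x ≠ [] := by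
  rw [stepB]
  split
  · simp
  · simp

theorem foldl_up_eq (l : List Int) :
    ∀ d : List Int, d ≠ [] → d.Pairwise (fun a b => a ≤ b) →
      l.foldl stepAUp d = l.foldl stepB d := by
  induction l with
  | nil => intro d _ _; rfl
  | cons y t ih =>
    intro d hne hd
    rw [List.foldl_cons, List.foldl_cons, stepAUp_eq_stepB d y hd hne]
    exact ih (stepB d y) (stepB_ne_nil d y) (stepB_sorted d y hd)

-- ===== the down pass: stepADown is the negated mirror of stepB =====

-- descending list: getElem is antitone
theorem desc_getElem_mono (d : List Int) (hd : d.Pairwise (fun a b => b ≤ a)) :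
    ∀ (i j : Nat) (hi : i < d.length) (hj : j < d.length), i ≤ j → d[j] ≤ d[i] := by
  intro i j hi hj hij
  by_cases hij' : i = j
  · subst hij'; exact le_refl _
  · exact List.pairwise_iff_getElem.mp hd i j hi hj (by omega)

-- descending list: indices below the count of elements > x hold elements > x, the rest ≤ x
theorem desc_count_facts (x : Int) (d : List Int)
    (hd : d.Pairwise (fun a b => b ≤ a)) :
    (∀ (j : Nat) (hj : j < d.length), j < d.countP (fun t => decide (x < t)) → x < d[j]) ∧
    (∀ (j : Nat) (hj : j < d.length), d.countP (fun t => decide (x < t)) ≤ j → d[j] ≤ x) := by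
  set p : Int → Bool := fun t => decide (x < t) with hp
  set J := d.countP p with hJ
  have hJle : J ≤ d.length := List.countP_le_length
  have hft : d.filter p = d.take J := filter_eq_take_desc x d hd
  have hF1 : ∀ (j : Nat) (hj : j < d.length), j < J → x < d[j] := by
    intro j hj hjJ
    have hjt : j < (d.take J).length := by simp; omega
    have hmem : (d.take J)[j] ∈ d.filter p := by
      rw [hft]; exact List.getElem_mem hjt
    have hto : (d.take J)[j] = d[j] := List.getElem_take
    have := (List.mem_filter.mp hmem).2
    rw [hto] at this
    simpa [hp] using this
  refine ⟨hF1, ?_⟩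
  have hcount_take : (d.take J).countP p = J := by
    have hall : ∀ a ∈ d.take J, p a = true := by
      intro a ha
      rw [List.mem_iff_getElem] at ha
      obtain ⟨j, hj, hja⟩ := ha
      have hjJ : j < J := lt_of_lt_of_le hj (by simp)
      have hto : (d.take J)[j] = d[j] := List.getElem_take
      rw [← hja, hto]
      simpa [hp] using hF1 j (by omega) hjJ
    rw [List.countP_eq_length.mpr hall, List.length_take]
    omega
  have hcount_drop : (d.drop J).countP p = 0 := by
    have hsplit : d = d.take J ++ d.drop J := (List.take_append_drop J d).symm
    have : d.countP p = (d.take J).countP p + (d.drop J).countP p := by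
      conv_lhs => rw [hsplit]
      rw [List.countP_append]
    omega
  intro j hj hJj
  have hlt : j - J < (d.drop J).length := by rw [List.length_drop]; omega
  have h1 : (d.drop J)[j - J]'hlt ∈ d.drop J := List.getElem_mem hlt
  rw [List.getElem_drop] at h1
  have h2 : J + (j - J) = j := by omega
  simp only [h2] at h1
  have := List.countP_eq_zero.mp hcount_drop _ h1
  simpa [hp] using this

-- the countP slot is a valid index as soon as the last element is < x
theorem desc_count_lt_length (x : Int) (d : List Int)
    (hd : d.Pairwise (fun a b => b ≤ a)) (hne : d ≠ [])
    (hlast : d.getLast hne < x) :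
    d.countP (fun t => decide (x < t)) < d.length := by
  have hlen : 0 < d.length := List.length_pos_iff.mpr hne
  have hJle : d.countP (fun t => decide (x < t)) ≤ d.length := List.countP_le_length
  by_contra hge
  have := (desc_count_facts x d hd).1 (d.length - 1) (by omega) (by omega)
  rw [List.getLast_eq_getElem] at hlast
  omega

-- base case of the binary search: the interval is empty, the insertion point is returned
theorem downBisect_base (x : Int) (d : List Int)
    (hd : d.Pairwise (fun a b => b ≤ a)) (hne : d ≠ [])
    (hlast : d.getLast hne < x) (s e : Int)
    (hse : s > e) (hs : 0 ≤ s) (he : e ≤ (d.length : Int) - 1)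
    (hlow : ∀ (j : Nat) (hj : j < d.length), (j : Int) < s → x < d[j])
    (hhigh : ∀ (j : Nat) (hj : j < d.length), e < (j : Int) → d[j] < x) :
    PySem.List.pySetD d (downBisect d s e x) x =
      d.take (d.countP (fun t => decide (x < t))) ++
        x :: d.drop (d.countP (fun t => decide (x < t)) + 1) := by
  set p : Int → Bool := fun t => decide (x < t) with hp
  have hlen : 0 < d.length := List.length_pos_iff.mpr hne
  have hsl' : s ≤ (d.length : Int) := by
    by_contra hgt
    push_neg at hgt
    have := hlow (d.length - 1) (by omega) (by omega)
    rw [List.getLast_eq_getElem] at hlast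
    omega
  have hsl : s.toNat ≤ d.length := by omega
  have hJs : d.countP p = s.toNat := by
    have hsplit : d = d.take s.toNat ++ d.drop s.toNat := (List.take_append_drop _ d).symm
    have hct : (d.take s.toNat).countP p = s.toNat := by
      have hall : ∀ a ∈ d.take s.toNat, p a = true := by
        intro a ha
        rw [List.mem_iff_getElem] at ha
        obtain ⟨j, hj, hja⟩ := ha
        have hjs : j < s.toNat := lt_of_lt_of_le hj (by simp)
        have hto : (d.take s.toNat)[j] = d[j]'(by omega) := List.getElem_take
        rw [← hja, hto]
        simpa [hp] using hlow j (by omega) (by omega)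
      rw [List.countP_eq_length.mpr hall, List.length_take]
      omega
    have hcd : (d.drop s.toNat).countP p = 0 := by
      rw [List.countP_eq_zero]
      intro a ha
      rw [List.mem_iff_getElem] at ha
      obtain ⟨j, hj, hja⟩ := ha
      have hjd : s.toNat + j < d.length := by
        have := List.length_drop (l := d) (i := s.toNat); omega
      have hto : (d.drop s.toNat)[j] = d[s.toNat + j] := List.getElem_drop
      rw [← hja, hto]
      simpa [hp] using not_lt.mpr (le_of_lt (hhigh (s.toNat + j) hjd (by omega)))
    conv_lhs => rw [hsplit]
    rw [List.countP_append, hct, hcd]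
    omega
  have hJlen : d.countP p < d.length := desc_count_lt_length x d hd hne hlast
  rw [downBisect, dif_pos hse, PySem.List.pySetD_of_nonneg d x hs]
  rw [hJs]
  exact List.set_eq_take_cons_drop x (by omega)

theorem downBisect_aux (x : Int) (d : List Int)
    (hd : d.Pairwise (fun a b => b ≤ a)) (hne : d ≠ [])
    (hlast : d.getLast hne < x) :
    ∀ (n : Nat) (s e : Int), (e + 1 - s).toNat ≤ n → 0 ≤ s → e ≤ (d.length : Int) - 1 →
      (∀ (j : Nat) (hj : j < d.length), (j : Int) < s → x < d[j]) →
      (∀ (j : Nat) (hj : j < d.length), e < (j : Int) → d[j] < x) →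
      PySem.List.pySetD d (downBisect d s e x) x =
        d.take (d.countP (fun t => decide (x < t))) ++
          x :: d.drop (d.countP (fun t => decide (x < t)) + 1) := by
  intro n
  induction n with
  | zero =>
    intro s e hm hs he hlow hhigh
    exact downBisect_base x d hd hne hlast s e (by omega) hs he hlow hhigh
  | succ n ih =>
    intro s e hm hs he hlow hhigh
    by_cases hse : s > e
    · exact downBisect_base x d hd hne hlast s e hse hs he hlow hhigh
    · push_neg at hse
      have hmid := PySem.Int.floordiv_two_mid_bounds (lo := s) (hi := e) hse
      set mid := PySem.Int.floordiv (s + e) 2 with hmiddef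
      have hmid0 : 0 ≤ mid := by omega
      have hmidlen : mid < (d.length : Int) := by omega
      have hmidlt : mid.toNat < d.length := by omega
      have hget : PySem.List.pyGetD d mid 0 = d[mid.toNat] :=
        PySem.List.pyGetD_eq_getElem d 0 hmid0 hmidlen
      rw [downBisect, dif_neg (by omega)]
      simp only [← hmiddef, hget]
      by_cases heq : d[mid.toNat] = x
      · rw [if_pos heq]
        have hKlen := desc_count_lt_length x d hd hne hlast
        set K := d.countP (fun t => decide (x < t)) with hK
        have hJmid : K ≤ mid.toNat := by
          by_contra hlt
          have := (desc_count_facts x d hd).1 mid.toNat hmidlt (by omega)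
          omega
        have hdJ : d[K]'hKlen = x := by
          have h1 := (desc_count_facts x d hd).2 K hKlen (le_refl _)
          have h2 := desc_getElem_mono d hd K mid.toNat hKlen hmidlt hJmid
          omega
        have hset : d.set mid.toNat x = d := by
          rw [← heq]; exact List.set_getElem_self hmidlt
        have hsetJ : d.set K x = d := by
          rw [← hdJ]; exact List.set_getElem_self hKlen
        rw [PySem.List.pySetD_of_nonneg d x hmid0, hset,
          ← List.set_eq_take_cons_drop x hKlen, hsetJ]
      · rw [if_neg heq]
        by_cases hgt : d[mid.toNat] > x
        · rw [if_pos hgt]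
          refine ih (mid + 1) e (by omega) (by omega) he ?_ hhigh
          intro j hj hjm
          have hjmid : j ≤ mid.toNat := by omega
          have := desc_getElem_mono d hd j mid.toNat hj hmidlt hjmid
          omega
        · rw [if_neg hgt]
          refine ih s (mid - 1) (by omega) hs (by omega) hlow ?_
          intro j hj hmj
          have hjmid : mid.toNat ≤ j := by omega
          have := desc_getElem_mono d hd mid.toNat j hmidlt hj hjmid
          omega

theorem downBisect_pySetD (x : Int) (d : List Int)
    (hd : d.Pairwise (fun a b => b ≤ a)) (s e : Int)
    (hs : 0 ≤ s) (he : e ≤ (d.length : Int) - 1)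
    (hlow : ∀ (j : Nat) (hj : j < d.length), (j : Int) < s → x < d[j])
    (hhigh : ∀ (j : Nat) (hj : j < d.length), e < (j : Int) → d[j] < x)
    (hne : d ≠ []) (hlast : d.getLast hne < x) :
    PySem.List.pySetD d (downBisect d s e x) x =
      d.take (d.countP (fun t => decide (x < t))) ++
        x :: d.drop (d.countP (fun t => decide (x < t)) + 1) :=
  downBisect_aux x d hd hne hlast (e + 1 - s).toNat s e (le_refl _) hs he hlow hhigh

theorem stepB_neg (d : List Int) (x : Int)
    (hd : d.Pairwise (fun a b => b ≤ a)) (hne : d ≠ []) :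
    stepB (d.map (fun t => -t)) (-x) = (stepADown d x).map (fun t => -t) := by
  have hmapne : d.map (fun t => -t) ≠ [] := by simpa using hne
  have hgl : PySem.List.pyGetD d (-1) 0 = d.getLast hne :=
    PySem.List.pyGetD_neg_one d 0 hne
  have hglm : PySem.List.pyGetD (d.map (fun t => -t)) (-1) 0 = -(d.getLast hne) := by
    rw [PySem.List.pyGetD_neg_one _ 0 hmapne]
    exact List.getLast_map hmapne
  by_cases h : x ≤ PySem.List.pyGetD d (-1) 0
  · rw [stepADown, if_pos h, stepB, if_pos (Or.inr (by rw [hglm]; rw [hgl] at h; omega))]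
    simp
  · rw [stepADown, if_neg h]
    rw [hgl] at h
    push_neg at h
    have hcond : ¬ (d.map (fun t => -t) = [] ∨
        -x ≥ PySem.List.pyGetD (d.map (fun t => -t)) (-1) 0) := by
      push_neg
      exact ⟨hmapne, by rw [hglm]; omega⟩
    rw [stepB, if_neg hcond]
    simp only
    have hlen : 0 < d.length := List.length_pos_iff.mpr hne
    have hfilt : (d.map (fun t => -t)).filter (fun t => decide (t < -x)) =
        (d.filter (fun t => decide (x < t))).map (fun t => -t) := by
      rw [List.filter_map]
      congr 1
      apply List.filter_congr
      intro t _
      simp only [Function.comp_apply, decide_eq_decide]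
      omega
    have hJ : ((d.map (fun t => -t)).filter (fun t => decide (t < -x))).length =
        d.countP (fun t => decide (x < t)) := by
      rw [hfilt, List.length_map, ← List.countP_eq_length_filter]
    rw [hJ]
    rw [downBisect_pySetD x d hd 0 ((d.length : Int) - 1) (by omega) (by omega)
      (by intro j hj hjs; omega)
      (by intro j hj hje; omega)
      hne h]
    rw [List.map_append, List.map_take, List.map_cons, List.map_drop]

theorem stepADown_eq_map (d : List Int) (x : Int)
    (hd : d.Pairwise (fun a b => b ≤ a)) (hne : d ≠ []) :
    stepADown d x = (stepB (d.map (fun t => -t)) (-x)).map (fun t => -t) := by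
  rw [stepB_neg d x hd hne, List.map_map]
  simp

theorem stepADown_ne_nil (d : List Int) (x : Int)
    (hd : d.Pairwise (fun a b => b ≤ a)) (hne : d ≠ []) :
    stepADown d x ≠ [] := by
  rw [stepADown_eq_map d x hd hne]
  simpa using stepB_ne_nil (d.map (fun t => -t)) (-x)

theorem stepADown_sorted (d : List Int) (x : Int)
    (hd : d.Pairwise (fun a b => b ≤ a)) (hne : d ≠ []) :
    (stepADown d x).Pairwise (fun a b => b ≤ a) := by
  rw [stepADown_eq_map d x hd hne]
  rw [List.pairwise_map]
  have hmd : (d.map (fun t => -t)).Pairwise (fun a b => a ≤ b) := by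
    rw [List.pairwise_map]
    exact hd.imp (by intro a b hab; omega)
  exact (stepB_sorted _ (-x) hmd).imp (by intro a b hab; omega)

theorem foldl_down_eq (l : List Int) :
    ∀ d : List Int, d ≠ [] → d.Pairwise (fun a b => b ≤ a) →
      (l.map (fun t => -t)).foldl stepB (d.map (fun t => -t)) =
        (l.foldl stepADown d).map (fun t => -t) := by
  induction l with
  | nil => intro d _ _; rfl
  | cons y t ih =>
    intro d hne hd
    rw [List.map_cons, List.foldl_cons, List.foldl_cons, stepB_neg d y hd hne]
    exact ih (stepADown d y) (stepADown_ne_nil d y hd hne) (stepADown_sorted d y hd hne)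

-- ===== VERDICT (by name: the statement is the Claim_ definition above) =====
theorem solution_spec : Claim_equal_solution := by
  unfold Claim_equal_solution
  intro kyul _ hpre
  unfold Spec_solution
  obtain ⟨k0, rest, rfl⟩ := List.exists_cons_of_ne_nil hpre
  have hup := foldl_up_eq rest [k0] (List.cons_ne_nil _ _) (List.pairwise_singleton _ _)
  have hdown := foldl_down_eq rest [k0] (List.cons_ne_nil _ _) (List.pairwise_singleton _ _)
  have hB0 : stepB [] k0 = [k0] := by rw [stepB, if_pos (Or.inl rfl)]; rfl
  have hB0' : stepB [] (-k0) = [-k0] := by rw [stepB, if_pos (Or.inl rfl)]; rfl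
  unfold solution solution_alt runB
  simp only [PySem.List.pyGetD_zero_cons]
  rw [PySem.List.foldl_pyRange_pyGetD' (k0 :: rest) 0 stepAUp [k0] (a := 1) (by omega),
      PySem.List.foldl_pyRange_pyGetD' (k0 :: rest) 0 stepADown [k0] (a := 1) (by omega)]
  simp only [Int.toNat_one, List.drop_succ_cons, List.drop_zero]
  rw [hup]
  rw [List.map_cons, List.foldl_cons, List.foldl_cons, hB0, hB0']
  have hmapsing : ([-k0] : List Int) = ([k0] : List Int).map (fun t => -t) := by simp
  rw [hmapsing, hdown, List.length_map]
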